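-- pv_equiv track=rewrite | github.com/Alexd-y/argus | backend/tests/integration/sandbox/test_image_security_contract.py | _strip_comments_and_continuations
-- ===== SOURCE A (Python) =====
-- def _strip_comments_and_continuations(text: str) -> list[str]:
--     """Return a list of normalised, comment-free directive lines.
--
--     Joins backslash-continuation lines into single logical directives.
--     Strips leading whitespace. Drops blank lines and pure-comment lines.
--     """
--     raw_lines = text.splitlines()
--     logical: list[str] = []
--     buffer: list[str] = []
--     for raw in raw_lines:
--         line = raw.rstrip()
--         # Skip pure-comment lines but only when no continuation buffer is
--         # open — Docker treats `\` followed by a comment as a syntax error,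
--         # but we don't need to police that here.
--         stripped = line.lstrip()
--         if not buffer and (not stripped or stripped.startswith("#")):
--             continue
--         if line.endswith("\\"):
--             buffer.append(line[:-1].rstrip())
--             continue
--         buffer.append(line)
--         logical.append(" ".join(part.strip() for part in buffer if part.strip()))
--         buffer = []
--     if buffer:
--         logical.append(" ".join(part.strip() for part in buffer if part.strip()))
--     return logical
-- ===== SOURCE B (Python) =====
-- def _strip_comments_and_continuations(text: str) -> list[str]:
--     """Group-then-emit rewrite: an index-driven outer loop skips blanks/comments,
--     an inner while collects one continuation group, then one join emits it."""
--     lines = text.splitlines()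
--     out: list[str] = []
--     i, n = 0, len(lines)
--     while i < n:
--         line = lines[i].rstrip()
--         i += 1
--         stripped = line.lstrip()
--         if not stripped or stripped.startswith("#"):
--             continue
--         parts: list[str] = []
--         while line.endswith("\\"):
--             parts.append(line[:-1].rstrip())
--             if i >= n:
--                 break
--             line = lines[i].rstrip()
--             i += 1
--         else:
--             parts.append(line)
--         out.append(" ".join(p.strip() for p in parts if p.strip()))
--     return out
-- ===== Notes on version B (the rewrite author's own statement) =====
-- stated objective: alternative
-- what changed: Replaces A's single flat pass with a buffer list and open-group flag by a nested group-then-emit structure: an index-driven outer loop that skips blanks/comments, an inner while that collects one whole continuation group, and a single join per directive.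
import Mathlib
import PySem

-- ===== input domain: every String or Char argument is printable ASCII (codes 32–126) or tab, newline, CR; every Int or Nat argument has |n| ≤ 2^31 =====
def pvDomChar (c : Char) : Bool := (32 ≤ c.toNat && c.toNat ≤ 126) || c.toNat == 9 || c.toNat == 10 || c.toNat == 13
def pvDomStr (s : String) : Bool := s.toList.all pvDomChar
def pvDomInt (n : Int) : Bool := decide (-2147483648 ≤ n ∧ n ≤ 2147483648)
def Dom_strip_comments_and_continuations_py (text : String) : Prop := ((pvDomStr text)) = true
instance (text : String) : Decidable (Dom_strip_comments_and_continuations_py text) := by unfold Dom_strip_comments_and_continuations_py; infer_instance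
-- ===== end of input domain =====

-- B replaces A's flat buffer/flag accumulator by a nested group-then-emit loop (alternative decomposition, same cost).

-- ===== PORT A =====
-- " ".join(part.strip() for part in buffer if part.strip())  (identical expression in both Pythons)
def pvEmit (buffer : List String) : String :=
  PySem.Str.join " " ((buffer.filter (fun p => !(PySem.Str.strip p == ""))).map PySem.Str.strip)

-- one iteration of A's for-loop over (logical, buffer)
def pvStepA (st : List String × List String) (raw : String) : List String × List String :=
  if st.2.isEmpty && (PySem.Str.lstrip (PySem.Str.rstrip raw) == ""
      || PySem.Str.startswith (PySem.Str.lstrip (PySem.Str.rstrip raw)) "#") then st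
  else if PySem.Str.endswith (PySem.Str.rstrip raw) "\\" then
    (st.1, st.2 ++ [PySem.Str.rstrip (PySem.Str.slice (PySem.Str.rstrip raw) none (some (-1)))])
  else (st.1 ++ [pvEmit (st.2 ++ [PySem.Str.rstrip raw])], [])

def strip_comments_and_continuations_py (text : String) : List String :=
  let st := (PySem.Str.splitlines text).foldl pvStepA ([], [])
  if st.2.isEmpty then st.1 else st.1 ++ [pvEmit st.2]

-- ===== PORT B =====
-- B's inner while: collect the continuation group started by `line`, return (parts, remaining lines)
def pvGrp (line : String) (rest : List String) : List String × List String :=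
  if PySem.Str.endswith line "\\" then
    match rest with
    | [] => ([PySem.Str.rstrip (PySem.Str.slice line none (some (-1)))], [])
    | r :: rs =>
      let p := pvGrp (PySem.Str.rstrip r) rs
      (PySem.Str.rstrip (PySem.Str.slice line none (some (-1))) :: p.1, p.2)
  else ([line], rest)

theorem pvGrp_snd_length : ∀ (rest : List String) (line : String),
    (pvGrp line rest).2.length ≤ rest.length := by
  intro rest
  induction rest with
  | nil => intro line; unfold pvGrp; split <;> simp
  | cons r rs ih =>
    intro line; unfold pvGrp; split
    · exact Nat.le_succ_of_le (ih (PySem.Str.rstrip r))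
    · simp

-- B's outer while over the remaining lines
def pvGo : List String → List String
  | [] => []
  | raw :: rest =>
    if PySem.Str.lstrip (PySem.Str.rstrip raw) == ""
        || PySem.Str.startswith (PySem.Str.lstrip (PySem.Str.rstrip raw)) "#" then pvGo rest
    else pvEmit (pvGrp (PySem.Str.rstrip raw) rest).1 :: pvGo (pvGrp (PySem.Str.rstrip raw) rest).2
termination_by l => l.length
decreasing_by
  · simp
  · exact Nat.lt_succ_of_le (pvGrp_snd_length rest (PySem.Str.rstrip raw))

def strip_comments_and_continuations_py_alt (text : String) : List String :=
  pvGo (PySem.Str.splitlines text)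

-- ===== PRECONDITION & SPEC =====
def Spec_strip_comments_and_continuations_py (text : String) (out : List String) : Prop := out = strip_comments_and_continuations_py_alt text
instance (text : String) (out : List String) : Decidable (Spec_strip_comments_and_continuations_py text out) := by unfold Spec_strip_comments_and_continuations_py; infer_instance

-- ===== CLAIM (what is proved, stated in full; the proofs are below) =====
def Claim_equal_strip_comments_and_continuations_py : Prop := ∀ (text : String), Dom_strip_comments_and_continuations_py text → Spec_strip_comments_and_continuations_py text (strip_comments_and_continuations_py text)

-- ===== LEMMAS AND PROOFS =====

-- A's final "if buffer: append" step
def pvFin (st : List String × List String) : List String :=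
  if st.2.isEmpty then st.1 else st.1 ++ [pvEmit st.2]

-- the continuation of a group whose opening lines are already buffered
def pvAux : List String → List String × List String
  | [] => ([], [])
  | r :: rs => pvGrp (PySem.Str.rstrip r) rs

theorem pvGrp_eq (line : String) (rest : List String) :
    pvGrp line rest =
      if PySem.Str.endswith line "\\" then
        (PySem.Str.rstrip (PySem.Str.slice line none (some (-1))) :: (pvAux rest).1, (pvAux rest).2)
      else ([line], rest) := by
  cases rest <;> simp [pvGrp, pvAux]

theorem pv_main : ∀ (lines log : List String),
    (pvFin (lines.foldl pvStepA (log, [])) = log ++ pvGo lines) ∧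
    (∀ buf, buf ≠ [] →
      pvFin (lines.foldl pvStepA (log, buf)) =
        log ++ pvEmit (buf ++ (pvAux lines).1) :: pvGo (pvAux lines).2) := by
  intro lines
  induction lines with
  | nil =>
    intro log
    refine ⟨by simp [pvFin, pvGo], ?_⟩
    intro buf hbuf
    simp [pvFin, pvGo, pvAux, List.isEmpty_eq_false_iff.mpr hbuf]
  | cons raw rest ih =>
    intro log
    have h2 : pvAux (raw :: rest) = pvGrp (PySem.Str.rstrip raw) rest := rfl
    constructor
    · by_cases hskip : (PySem.Str.lstrip (PySem.Str.rstrip raw) == ""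
          || PySem.Str.startswith (PySem.Str.lstrip (PySem.Str.rstrip raw)) "#") = true
      · have h1 : pvStepA (log, []) raw = (log, []) := by
          simp only [pvStepA, List.isEmpty_nil, Bool.true_and, hskip, if_pos]
        rw [List.foldl_cons, h1, (ih log).1, pvGo, if_pos hskip]
      · by_cases hend : PySem.Str.endswith (PySem.Str.rstrip raw) "\\" = true
        · have h1 : pvStepA (log, []) raw =
              (log, [PySem.Str.rstrip (PySem.Str.slice (PySem.Str.rstrip raw) none (some (-1)))]) := by
            simp only [pvStepA, List.isEmpty_nil, Bool.true_and, List.nil_append]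
            rw [if_neg hskip, if_pos hend]
          rw [List.foldl_cons, h1, (ih log).2 _ (by simp), pvGo, if_neg hskip, pvGrp_eq,
            if_pos hend]
          simp
        · have h1 : pvStepA (log, []) raw = (log ++ [pvEmit [PySem.Str.rstrip raw]], []) := by
            simp only [pvStepA, List.isEmpty_nil, Bool.true_and, List.nil_append]
            rw [if_neg hskip, if_neg hend]
          rw [List.foldl_cons, h1, (ih _).1, pvGo, if_neg hskip, pvGrp_eq, if_neg hend]
          simp
    · intro buf hbuf
      have hne : buf.isEmpty = false := List.isEmpty_eq_false_iff.mpr hbuf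
      by_cases hend : PySem.Str.endswith (PySem.Str.rstrip raw) "\\" = true
      · have h1 : pvStepA (log, buf) raw =
            (log, buf ++ [PySem.Str.rstrip (PySem.Str.slice (PySem.Str.rstrip raw) none (some (-1)))]) := by
          simp only [pvStepA, hne, Bool.false_and]
          rw [if_neg (by simp), if_pos hend]
        rw [List.foldl_cons, h1, (ih log).2 _ (by simp), h2, pvGrp_eq, if_pos hend]
        simp
      · have h1 : pvStepA (log, buf) raw = (log ++ [pvEmit (buf ++ [PySem.Str.rstrip raw])], []) := by
          simp only [pvStepA, hne, Bool.false_and]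
          rw [if_neg (by simp), if_neg hend]
        rw [List.foldl_cons, h1, (ih _).1, h2, pvGrp_eq, if_neg hend]
        simp

-- ===== VERDICT (by name: the statement is the Claim_ definition above) =====
theorem strip_comments_and_continuations_py_spec : Claim_equal_strip_comments_and_continuations_py := by
  intro text _
  show _ = _
  have h := (pv_main (PySem.Str.splitlines text) []).1
  simpa [strip_comments_and_continuations_py, strip_comments_and_continuations_py_alt, pvFin] using h
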